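-- pv_equiv track=rewrite | github.com/sgl-project/sglang-jax | python/sgl_jax/srt/kernels/quantized_matmul/kernel.py | _nearest_power_of_two_multiple
-- ===== SOURCE A (Python) =====
-- def _nearest_power_of_two_multiple(x: int, base: int, upper_bound: int) -> int:
--     """Snap ``x`` to a nearby power-of-two multiple of ``base``.
--
--     The imported TPU blockwise kernel is more reliable with tile sizes that are
--     aligned to the compute tile width. This helper keeps the candidate near the
--     requested value while respecting the local matrix bound.
--     """
--     if base <= 0:
--         return x
--
--     x = max(base, x)
--     units = max(1, x // base)
--     lower_units = 1 << (units.bit_length() - 1)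
--     upper_units = lower_units if lower_units == units else lower_units << 1
--
--     def _candidate(units_value: int) -> int:
--         return units_value * base
--
--     lower = _candidate(lower_units)
--     upper = _candidate(upper_units)
--     candidates = [value for value in (lower, upper) if value <= upper_bound]
--     if not candidates:
--         candidates = [lower]
--
--     return min(candidates, key=lambda value: (abs(value - x), -value))
-- ===== SOURCE B (Python) =====
-- def _nearest_power_of_two_multiple(x: int, base: int, upper_bound: int) -> int:
--     """Snap x to a nearby power-of-two multiple of base (doubling-loop version)."""
--     if base <= 0:
--         return x
--     if x < base:
--         x = base
--     lower = base
--     while 2 * lower <= x: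
--         lower *= 2
--     if x - lower < base:
--         # x // base is exactly a power of two: lower is the only candidate value.
--         return lower
--     upper = 2 * lower
--     if upper > upper_bound:
--         return lower
--     if lower > upper_bound:
--         return upper
--     return upper if upper - x <= x - lower else lower
-- ===== Notes on version B (the rewrite author's own statement) =====
-- stated objective: alternative
-- what changed: Replaces the bit_length closed form (units = x//base, highest power of two via bit_length, candidate list + filter + min with a (abs distance, -value) key) with an explicit doubling loop that brackets x between base*2^k and base*2^(k+1) directly, and replaces the filter/min selection with direct branch comparisons.
import Mathlib
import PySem

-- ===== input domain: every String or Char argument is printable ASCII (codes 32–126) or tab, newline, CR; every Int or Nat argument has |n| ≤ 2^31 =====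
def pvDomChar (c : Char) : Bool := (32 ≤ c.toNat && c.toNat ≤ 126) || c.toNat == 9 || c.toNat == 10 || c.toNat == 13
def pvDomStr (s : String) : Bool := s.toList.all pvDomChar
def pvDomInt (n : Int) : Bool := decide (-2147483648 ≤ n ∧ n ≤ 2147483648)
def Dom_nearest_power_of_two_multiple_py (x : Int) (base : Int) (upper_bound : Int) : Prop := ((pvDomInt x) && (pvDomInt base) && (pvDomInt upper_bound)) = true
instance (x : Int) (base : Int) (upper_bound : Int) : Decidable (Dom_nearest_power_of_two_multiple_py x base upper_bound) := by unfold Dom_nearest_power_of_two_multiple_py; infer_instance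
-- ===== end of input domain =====

-- B replaces A's bit_length closed form with an explicit doubling loop that finds the
-- bracketing power-of-two multiples of base directly, and replaces the filter + min-by-key
-- selection with direct comparisons (objective: simpler/alternative, not faster).

-- ===== PORT A =====
def nearest_power_of_two_multiple_py (x : Int) (base : Int) (upper_bound : Int) : Int :=
  if base ≤ 0 then x
  else
    let x := max base x
    let units := max 1 (PySem.Int.floordiv x base)
    let lower_units : Int := 1 <<< (PySem.Int.bitLength units - 1)
    let upper_units : Int := if lower_units = units then lower_units else lower_units <<< (1:Nat)
    let lower := lower_units * base
    let upper := upper_units * base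
    let candidates := ([lower, upper]).filter (fun value => value ≤ upper_bound)
    let candidates := if candidates = [] then [lower] else candidates
    -- min(candidates, key=lambda value: (abs(value - x), -value)); candidates is nonempty
    (PySem.List.min2? candidates (fun value => |value - x|) (fun value => -value)).getD 0

-- ===== PORT B =====
def growLoop (x : Int) (lower : Int) : Int :=
  -- 'while 2 * lower <= x: lower *= 2' ; the 0 < lower guard only makes it total
  if h : 0 < lower ∧ 2 * lower ≤ x then growLoop x (2 * lower) else lower
termination_by (x - lower).toNat
decreasing_by
  obtain ⟨hpos, hle⟩ := h; omega

def nearest_power_of_two_multiple_py_alt (x : Int) (base : Int) (upper_bound : Int) : Int :=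
  if base ≤ 0 then x
  else
    let x := if x < base then base else x
    let lower := growLoop x base
    if x - lower < base then lower
    else
      let upper := 2 * lower
      if upper_bound < upper then lower
      else if upper_bound < lower then upper
      else if upper - x ≤ x - lower then upper else lower

-- ===== PRECONDITION & SPEC =====
def Spec_nearest_power_of_two_multiple_py (x : Int) (base : Int) (upper_bound : Int) (out : Int) : Prop := out = nearest_power_of_two_multiple_py_alt x base upper_bound
instance (x : Int) (base : Int) (upper_bound : Int) (out : Int) : Decidable (Spec_nearest_power_of_two_multiple_py x base upper_bound out) := by unfold Spec_nearest_power_of_two_multiple_py; infer_instance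

-- ===== CLAIM (what is proved, stated in full; the proofs are below) =====
def Claim_equal_nearest_power_of_two_multiple_py : Prop := ∀ (x : Int) (base : Int) (upper_bound : Int), Dom_nearest_power_of_two_multiple_py x base upper_bound → Spec_nearest_power_of_two_multiple_py x base upper_bound (nearest_power_of_two_multiple_py x base upper_bound)

-- ===== LEMMAS AND PROOFS =====

-- bit_length bracket: for 0 < n, 2^(bitLength n - 1) ≤ n < 2^(bitLength n)
lemma bitLength_bracket_nat : ∀ m : Nat, 0 < m →
    (2:Int) ^ (PySem.Int.bitLength (m:Int) - 1) ≤ (m:Int) ∧ (m:Int) < (2:Int) ^ (PySem.Int.bitLength (m:Int)) := by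
  intro m
  induction m using Nat.strong_induction_on with
  | _ m ih =>
    intro hm
    rcases eq_or_ne m 1 with rfl | hm1
    · simp only [Nat.cast_one]; decide
    · have h2 : 2 ≤ m := by omega
      have hbl := PySem.Int.bitLength_natCast (show 0 < m by omega)
      obtain ⟨hlo, hhi⟩ := ih (m / 2) (by omega) (by omega)
      set q := m / 2 with hqdef
      set b := PySem.Int.bitLength (q:Int) with hbdef
      have hb1 : 1 ≤ b := by
        by_contra h
        have hb0 : b = 0 := by omega
        rw [hb0] at hhi
        norm_num at hhi
        omega
      rw [hbl]
      have hpow : (2:Int) ^ b = 2 * 2 ^ (b - 1) := by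
        conv_lhs => rw [show b = (b - 1) + 1 by omega]
        ring
      have hdiv : 2 * (q:Int) ≤ (m:Int) ∧ (m:Int) ≤ 2 * (q:Int) + 1 := by omega
      constructor
      · rw [show b + 1 - 1 = b by omega, hpow]
        linarith [hdiv.1]
      · rw [pow_succ]
        linarith [hdiv.2]

lemma bitLength_bracket (n : Int) (hn : 0 < n) :
    (2:Int) ^ (PySem.Int.bitLength n - 1) ≤ n ∧ n < (2:Int) ^ (PySem.Int.bitLength n) := by
  have h := bitLength_bracket_nat n.toNat (by omega)
  have hcast : ((n.toNat : Nat) : Int) = n := by omega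
  rwa [hcast] at h

-- growLoop spec: result is lower·2^k, ≤ x, and doubling it exceeds x
lemma growLoop_spec (x : Int) (lower : Int) (h0 : 0 < lower) (hle : lower ≤ x) :
    ∃ k : Nat, growLoop x lower = lower * 2 ^ k ∧ growLoop x lower ≤ x ∧ x < 2 * growLoop x lower := by
  have aux : ∀ (fuel : Nat) (lo : Int), (x - lo).toNat ≤ fuel → 0 < lo → lo ≤ x →
      ∃ k : Nat, growLoop x lo = lo * 2 ^ k ∧ growLoop x lo ≤ x ∧ x < 2 * growLoop x lo := by
    intro fuel
    induction fuel with
    | zero =>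
      intro lo hf h0' hle'
      rw [growLoop]
      have hnc : ¬ (0 < lo ∧ 2 * lo ≤ x) := by omega
      rw [dif_neg hnc]
      exact ⟨0, by ring, hle', by omega⟩
    | succ n ih =>
      intro lo hf h0' hle'
      rw [growLoop]
      by_cases hc : 0 < lo ∧ 2 * lo ≤ x
      · rw [dif_pos hc]
        obtain ⟨k, hk, hk1, hk2⟩ := ih (2 * lo) (by omega) (by omega) hc.2
        exact ⟨k + 1, by rw [hk]; ring, hk1, hk2⟩
      · rw [dif_neg hc]
        exact ⟨0, by ring, hle', by omega⟩
  exact aux (x - lower).toNat lower (le_refl _) h0 hle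

-- uniqueness of the bracketing power-of-two multiple
lemma bracket_unique (base x L1 L2 : Int) (hb : 0 < base)
    (h1 : ∃ j : Nat, L1 = base * 2 ^ j) (h2 : ∃ k : Nat, L2 = base * 2 ^ k)
    (hL1 : L1 ≤ x) (hU1 : x < 2 * L1) (hL2 : L2 ≤ x) (hU2 : x < 2 * L2) : L1 = L2 := by
  obtain ⟨j, rfl⟩ := h1
  obtain ⟨k, rfl⟩ := h2
  have key : ∀ p q : Nat, p < q → base * 2 ^ q ≤ x → x < 2 * (base * 2 ^ p) → False := by
    intro p q hpq hle hlt
    have hsplit : base * 2 ^ q = base * 2 ^ p * 2 ^ (q - p) := by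
      rw [mul_assoc, ← pow_add]; congr 2; omega
    have h2le : (2:Int) ≤ 2 ^ (q - p) := by
      calc (2:Int) = 2 ^ 1 := by ring
      _ ≤ 2 ^ (q - p) := by apply pow_le_pow_right₀ (by norm_num) (by omega)
    have hpos : (0:Int) < base * 2 ^ p := by positivity
    nlinarith
  rcases lt_trichotomy j k with h | h | h
  · exact (key j k h hL2 hU1).elim
  · rw [h]
  · exact (key k j h hL1 hU2).elim
-- evaluating min(candidates, key=...) on the concrete candidate lists
lemma getD_min2_one (a X : Int) :
    (PySem.List.min2? [a] (fun value => |value - X|) (fun value => -value)).getD 0 = a := rfl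

lemma getD_min2_same (a X : Int) :
    (PySem.List.min2? [a, a] (fun value => |value - X|) (fun value => -value)).getD 0 = a := by
  dsimp only [PySem.List.min2?, List.foldl]
  split_ifs <;> rfl

lemma getD_min2_bracket (a X : Int) (h1 : a ≤ X) (h2 : X < 2 * a) :
    (PySem.List.min2? [a, 2 * a] (fun value => |value - X|) (fun value => -value)).getD 0 =
      if 2 * a - X ≤ X - a then 2 * a else a := by
  dsimp only [PySem.List.min2?, List.foldl]
  have e1 : |a - X| = X - a := by rw [abs_of_nonpos (by omega)]; ring
  have e2 : |2 * a - X| = 2 * a - X := abs_of_nonneg (by omega)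
  simp only [e1, e2]
  by_cases hc : 2 * a - X ≤ X - a
  · rw [if_pos hc, if_pos (by
      simp only [Bool.or_eq_true, decide_eq_true_eq, Bool.and_eq_true, Bool.not_eq_true',
        decide_eq_false_iff_not]
      omega)]
    rfl
  · rw [if_neg hc, if_neg (by
      simp only [Bool.or_eq_true, decide_eq_true_eq, Bool.and_eq_true, Bool.not_eq_true',
        decide_eq_false_iff_not]
      omega)]
    rfl

-- ===== VERDICT (by name: the statement is the Claim_ definition above) =====
theorem nearest_power_of_two_multiple_py_spec : Claim_equal_nearest_power_of_two_multiple_py := by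
  intro x base upper_bound _
  unfold Spec_nearest_power_of_two_multiple_py nearest_power_of_two_multiple_py nearest_power_of_two_multiple_py_alt
  by_cases hb : base ≤ 0
  · rw [if_pos hb, if_pos hb]
  rw [if_neg hb, if_neg hb]
  replace hb : 0 < base := by omega
  have hmax : (if x < base then base else x) = max base x := by
    rcases lt_or_ge x base with h | h
    · rw [if_pos h, max_eq_left (by omega)]
    · rw [if_neg (by omega), max_eq_right h]
  rw [hmax]
  dsimp only
  set X : Int := max base x with hXdef
  have hXb : base ≤ X := le_max_left _ _
  have hu1 : 1 ≤ PySem.Int.floordiv X base := (PySem.Int.le_floordiv_iff_mul_le hb).mpr (by omega)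
  set u : Int := PySem.Int.floordiv X base with hudef
  rw [max_eq_right hu1]
  -- A's lower candidate
  obtain ⟨hlo, hhi⟩ := bitLength_bracket u (by omega)
  set bl : Nat := PySem.Int.bitLength u with hbldef
  have hbl1 : 1 ≤ bl := by
    by_contra h
    have hb0 : bl = 0 := by omega
    rw [hb0] at hhi
    norm_num at hhi
    omega
  have hsh : ((1 <<< (bl - 1) : Nat) : Int) = (2:Int) ^ (bl - 1) := by
    rw [Nat.shiftLeft_eq, one_mul]
    push_cast
    rfl
  rw [hsh]
  set L : Int := (2:Int) ^ (bl - 1) with hLdef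
  have hpow : (2:Int) ^ bl = 2 * L := by
    rw [hLdef]
    conv_lhs => rw [show bl = (bl - 1) + 1 by omega]
    ring
  have hLpos : 0 < L := by positivity
  have hLA_le : L * base ≤ X := by
    have := (PySem.Int.le_floordiv_iff_mul_le (a := X) (q := L) hb).mp (by rw [← hudef]; exact hlo)
    linarith
  have hLA_hi : X < 2 * (L * base) := by
    have := (PySem.Int.floordiv_lt_iff_lt_mul (a := X) (q := 2 * L) hb).mp (by rw [← hudef]; omega)
    linarith
  -- B's lower candidate equals A's
  obtain ⟨k, hk, hgl, hgh⟩ := growLoop_spec X base hb hXb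
  have hLL : L * base = growLoop X base := by
    apply bracket_unique base X (L * base) (growLoop X base) hb ⟨bl - 1, by ring⟩ ⟨k, hk⟩ hLA_le hLA_hi hgl hgh
  rw [← hLL]
  -- abstract the lower candidate to a single variable
  have hcond : L = u ↔ X - L * base < base := by
    constructor
    · intro he
      have := (PySem.Int.floordiv_lt_iff_lt_mul (a := X) (q := u + 1) hb).mp (by omega)
      nlinarith
    · intro hx
      have h1 : u < L + 1 := (PySem.Int.floordiv_lt_iff_lt_mul (a := X) (q := L + 1) hb).mpr (by linarith)
      omega
  obtain ⟨LA, hLAeq⟩ : ∃ v, L * base = v := ⟨_, rfl⟩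
  have hLApos : 0 < LA := by rw [← hLAeq]; positivity
  rw [hLAeq] at hLA_le hLA_hi hcond ⊢
  by_cases he : L = u
  · -- upper = lower: A keeps a single distinct candidate; B takes its first branch
    rw [if_pos he, if_pos (hcond.mp he), hLAeq]
    by_cases hub : LA ≤ upper_bound
    · have hf : List.filter (fun value => decide (value ≤ upper_bound)) [LA, LA]
          = [LA, LA] := by simp [hub]
      rw [hf, if_neg (by simp), getD_min2_same]
    · have hf : List.filter (fun value => decide (value ≤ upper_bound)) [LA, LA]
          = [] := by simp [hub]
      rw [hf, if_pos rfl, getD_min2_one]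
  · rw [if_neg he, if_neg (fun hx => he (hcond.mpr hx))]
    have h2L : L <<< (1:Nat) * base = 2 * LA := by
      rw [Int.shiftLeft_eq, ← hLAeq]; ring
    rw [h2L]
    by_cases hub2 : 2 * LA ≤ upper_bound
    · have hub1 : LA ≤ upper_bound := by omega
      have hf : List.filter (fun value => decide (value ≤ upper_bound)) [LA, 2 * LA]
          = [LA, 2 * LA] := by simp [hub1, hub2]
      rw [hf, if_neg (by simp), getD_min2_bracket LA X hLA_le hLA_hi,
        if_neg (show ¬ upper_bound < 2 * LA by omega), if_neg (show ¬ upper_bound < LA by omega)]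
    · rw [if_pos (show upper_bound < 2 * LA by omega)]
      by_cases hub1 : LA ≤ upper_bound
      · have hf : List.filter (fun value => decide (value ≤ upper_bound)) [LA, 2 * LA]
            = [LA] := by simp [hub1, hub2]
        rw [hf, if_neg (by simp), getD_min2_one]
      · have hf : List.filter (fun value => decide (value ≤ upper_bound)) [LA, 2 * LA]
            = [] := by simp [hub1, hub2]
        rw [hf, if_pos rfl, getD_min2_one]
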